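-- pv_equiv track=rewrite | github.com/Bruno-Limon/yolo-integral-solution | src/utils/detection_utils.py | load_model_size
-- ===== SOURCE A (Python) =====
-- ENV_VAR_TRUE_LABEL = "true"
--
-- def load_model_size(model_size:str, library:str, do_pose:str)->str:
--     """
--     given the size and library of models to use, returns the correct way to
--     initialize their model
--
--     params:
--         model_size: size of model to use, either nano, small or medium
--         library: library to use either yolox or yolov8
--         do_pose: wether pose_detection model is used
--     """
--     model_detection = None
--     model_pose = None
--     list_sizes = ["nano", "small", "medium", "large"]
--
--     if model_size in list_sizes:
--         for size in list_sizes: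
--             if library == "supergradients" and model_size == size:
--                 model_detection = f"yolox_{size[0]}"
--
--             if library == "yolox" and model_size == size:
--                 model_detection = f"src/models/yolox_{size[0]}.pth"
--
--             if library == "ultralytics" and model_size == size:
--                 model_detection = f"yolov8{size[0]}.pt"
--
--             if library == "ultralytics" and model_size == size and do_pose == ENV_VAR_TRUE_LABEL:
--                 model_pose = f"yolov8{size[0]}-pose.pt"
--     else:
--         raise ValueError(f"Error in '{model_size}': 'model_size' must be one of {list_sizes}")
--
--     return model_detection, model_pose
-- ===== SOURCE B (Python) =====
-- ENV_VAR_TRUE_LABEL = "true"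
--
-- # Table-driven: a template dict keyed by library replaces the guarded scan.
-- _MODEL_TEMPLATES = {
--     "supergradients": ("yolox_{}", None),
--     "yolox": ("src/models/yolox_{}.pth", None),
--     "ultralytics": ("yolov8{}.pt", "yolov8{}-pose.pt"),
-- }
-- _SIZES = ["nano", "small", "medium", "large"]
--
-- def load_model_size(model_size: str, library: str, do_pose: str) -> str:
--     if model_size not in _SIZES:
--         raise ValueError(f"Error in '{model_size}': 'model_size' must be one of {_SIZES}")
--     det_t, pose_t = _MODEL_TEMPLATES.get(library, (None, None))
--     c = model_size[0]
--     det = det_t.format(c) if det_t is not None else None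
--     pose = pose_t.format(c) if pose_t is not None and do_pose == ENV_VAR_TRUE_LABEL else None
--     return det, pose
-- ===== Notes on version B (the rewrite author's own statement) =====
-- stated objective: alternative
-- what changed: Replaces A's guarded loop over the size list by a table-driven lookup: a template dict keyed by library yields (detection, pose) format templates that are instantiated once with model_size[0].
import Mathlib
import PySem

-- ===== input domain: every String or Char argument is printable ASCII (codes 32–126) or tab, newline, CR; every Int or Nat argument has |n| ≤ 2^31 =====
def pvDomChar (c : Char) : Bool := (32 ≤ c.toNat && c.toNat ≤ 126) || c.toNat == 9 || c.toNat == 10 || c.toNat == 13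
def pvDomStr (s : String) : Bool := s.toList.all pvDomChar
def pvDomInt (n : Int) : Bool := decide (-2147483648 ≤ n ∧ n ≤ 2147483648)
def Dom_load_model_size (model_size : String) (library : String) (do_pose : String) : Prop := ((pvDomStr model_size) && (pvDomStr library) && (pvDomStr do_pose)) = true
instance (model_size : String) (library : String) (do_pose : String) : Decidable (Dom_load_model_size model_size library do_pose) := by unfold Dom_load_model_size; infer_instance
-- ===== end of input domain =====

-- B is table-driven: a template dict keyed by library replaces A's guarded scan over the size list (alternative decomposition, same cost).
-- Both sides raise ValueError on an unknown model_size (excluded by Pre_).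

-- ===== PORT A =====
def pvListSizes : List String := ["nano", "small", "medium", "large"]

-- size[0] on the nonempty literal sizes; getD "" is never the fallback there
def pvFirst (s : String) : String := match PySem.Str.pyGet? s 0 with
  | some c => c.toString
  | none => ""

def load_model_size (model_size : String) (library : String) (do_pose : String) : Option String × Option String :=
  if pvListSizes.contains model_size then
    pvListSizes.foldl (fun (st : Option String × Option String) size =>
      let md := if library == "supergradients" && model_size == size then some ("yolox_" ++ pvFirst size) else st.1
      let md := if library == "yolox" && model_size == size then some ("src/models/yolox_" ++ pvFirst size ++ ".pth") else md
      let md := if library == "ultralytics" && model_size == size then some ("yolov8" ++ pvFirst size ++ ".pt") else md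
      let mp := if library == "ultralytics" && model_size == size && do_pose == "true" then some ("yolov8" ++ pvFirst size ++ "-pose.pt") else st.2
      (md, mp)) (none, none)
  else (none, none)  -- ValueError in Python; excluded by Pre_

-- ===== PORT B =====
-- the template dict _MODEL_TEMPLATES of Source B
def pvTemplates : PySem.Dict String (Option String × Option String) :=
  PySem.Dict.ofList
    [("supergradients", (some "yolox_{}", none)),
     ("yolox", (some "src/models/yolox_{}.pth", none)),
     ("ultralytics", (some "yolov8{}.pt", some "yolov8{}-pose.pt"))]

-- t.format(c): each template holds exactly one "{}" and c is a single letter, so replace is exact here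
def pvFormat1 (t : String) (c : String) : String := PySem.Str.replace t "{}" c

def load_model_size_alt (model_size : String) (library : String) (do_pose : String) : Option String × Option String :=
  if pvListSizes.contains model_size then
    let tp := pvTemplates.getD library (none, none)
    let c := pvFirst model_size
    (tp.1.map (fun t => pvFormat1 t c),
     match tp.2 with
     | some t => if do_pose == "true" then some (pvFormat1 t c) else none
     | none => none)
  else (none, none)  -- ValueError in Python; excluded by Pre_

-- ===== PRECONDITION & SPEC =====
-- Pre_ excludes exactly the inputs where A raises ValueError (model_size not one of the four sizes).
def Pre_load_model_size (model_size : String) (library : String) (do_pose : String) : Prop :=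
  model_size ∈ (["nano", "small", "medium", "large"] : List String)
instance (model_size : String) (library : String) (do_pose : String) : Decidable (Pre_load_model_size model_size library do_pose) := by unfold Pre_load_model_size; infer_instance
def pvWitness_load_model_size : String × String × String := ("nano", "ultralytics", "true")

def Spec_load_model_size (model_size : String) (library : String) (do_pose : String) (out : Option String × Option String) : Prop := out = load_model_size_alt model_size library do_pose
instance (model_size : String) (library : String) (do_pose : String) (out : Option String × Option String) : Decidable (Spec_load_model_size model_size library do_pose out) := by unfold Spec_load_model_size; infer_instance

-- ===== CLAIM =====
def Claim_equal_load_model_size : Prop := ∀ (model_size : String) (library : String) (do_pose : String), Dom_load_model_size model_size library do_pose → Pre_load_model_size model_size library do_pose → Spec_load_model_size model_size library do_pose (load_model_size model_size library do_pose)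

-- ===== LEMMAS AND PROOFS =====
theorem pvTemplates_getD (l : String) : pvTemplates.getD l ((none : Option String), (none : Option String)) =
    if "supergradients" = l then (some "yolox_{}", none)
    else if "yolox" = l then (some "src/models/yolox_{}.pth", none)
    else if "ultralytics" = l then (some "yolov8{}.pt", some "yolov8{}-pose.pt")
    else (none, none) := by
  have h : pvTemplates = PySem.Dict.mk
      [("supergradients", (some "yolox_{}", none)),
       ("yolox", (some "src/models/yolox_{}.pth", none)),
       ("ultralytics", (some "yolov8{}.pt", some "yolov8{}-pose.pt"))] := by rfl
  rw [h]
  simp [PySem.Dict.getD_eq_get?_getD, PySem.Dict.get?_mk_cons]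
  split_ifs <;> rfl

-- ===== VERDICT =====
theorem load_model_size_spec : Claim_equal_load_model_size := by
  intro ms lib dp _ hpre
  unfold Spec_load_model_size
  have h : ms = "nano" ∨ ms = "small" ∨ ms = "medium" ∨ ms = "large" := by
    simpa [Pre_load_model_size] using hpre
  rcases h with h | h | h | h <;> subst h <;>
    by_cases h1 : lib = "supergradients" <;>
    by_cases h2 : lib = "yolox" <;>
    by_cases h3 : lib = "ultralytics" <;>
    by_cases h4 : dp = "true" <;>
    simp_all [load_model_size, load_model_size_alt, pvListSizes, pvFirst, pvTemplates_getD,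
      pvFormat1, PySem.Str.pyGet?, PySem.Str.replace] <;>
    first | decide | (split_ifs <;> simp_all)
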